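-- pv_equiv track=rewrite | github.com/mohamedsamake8322/sama-agro-intelligence | data/locations.py | get_location_climate
-- ===== SOURCE A (Python) =====
-- CLIMATE_ZONES = {
--     'Tropical Rainforest': {
--         'characteristics': 'High rainfall, high humidity, constant temperatures',
--         'rainfall': '1500-3000mm annually',
--         'temperature': '20-30°C year-round',
--         'locations': [
--             "Kinshasa, Congo (DRC)", "Douala, Cameroon", "Libreville, Gabon",
--             "Abidjan, Ivory Coast", "Monrovia, Liberia"
--         ]
--     },
--
--     'Tropical Savanna': {
--         'characteristics': 'Distinct wet and dry seasons',
--         'rainfall': '600-1500mm annually',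
--         'temperature': '18-35°C',
--         'locations': [
--             "Lagos, Nigeria", "Accra, Ghana", "Nairobi, Kenya",
--             "Dar es Salaam, Tanzania", "Lusaka, Zambia"
--         ]
--     },
--
--     'Semi-Arid (Sahel)': {
--         'characteristics': 'Low, erratic rainfall, high temperatures',
--         'rainfall': '200-600mm annually',
--         'temperature': '20-40°C',
--         'locations': [
--             "Niamey, Niger", "Bamako, Mali", "Ouagadougou, Burkina Faso",
--             "N'Djamena, Chad", "Khartoum, Sudan"
--         ]
--     },
--
--     'Arid (Desert)': {
--         'characteristics': 'Very low rainfall, extreme temperatures',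
--         'rainfall': 'Less than 200mm annually',
--         'temperature': '15-45°C',
--         'locations': [
--             "Cairo, Egypt", "Tripoli, Libya", "Windhoek, Namibia"
--         ]
--     },
--
--     'Mediterranean': {
--         'characteristics': 'Mild, wet winters and dry summers',
--         'rainfall': '300-800mm annually',
--         'temperature': '10-30°C',
--         'locations': [
--             "Casablanca, Morocco", "Algiers, Algeria", "Tunis, Tunisia",
--             "Cape Town, South Africa"
--         ]
--     },
--
--     'Highland Tropical': {
--         'characteristics': 'Cooler temperatures due to altitude, bimodal rainfall',
--         'rainfall': '800-2000mm annually',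
--         'temperature': '10-25°C',
--         'locations': [
--             "Addis Ababa, Ethiopia", "Nairobi, Kenya", "Kigali, Rwanda",
--             "Kampala, Uganda", "Antananarivo, Madagascar"
--         ]
--     }
-- }
--
-- def get_location_climate(location):
--     """Get climate information for a specific location"""
--     for climate, info in CLIMATE_ZONES.items():
--         if location in info['locations']:
--             return {
--                 'climate_type': climate,
--                 'characteristics': info['characteristics'],
--                 'rainfall': info['rainfall'],
--                 'temperature': info['temperature']
--             }
--     return None
-- ===== SOURCE B (Python) =====
-- CLIMATE_ZONES = {'Tropical Rainforest': {'characteristics': 'High rainfall, high humidity, constant temperatures', 'rainfall': '1500-3000mm annually', 'temperature': '20-30°C year-round', 'locations': ['Kinshasa, Congo (DRC)', 'Douala, Cameroon', 'Libreville, Gabon', 'Abidjan, Ivory Coast', 'Monrovia, Liberia']}, 'Tropical Savanna': {'characteristics': 'Distinct wet and dry seasons', 'rainfall': '600-1500mm annually', 'temperature': '18-35°C', 'locations': ['Lagos, Nigeria', 'Accra, Ghana', 'Nairobi, Kenya', 'Dar es Salaam, Tanzania', 'Lusaka, Zambia']}, 'Semi-Arid (Sahel)': {'characteristics': 'Low,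 erratic rainfall, high temperatures', 'rainfall': '200-600mm annually', 'temperature': '20-40°C', 'locations': ['Niamey, Niger', 'Bamako, Mali', 'Ouagadougou, Burkina Faso', "N'Djamena, Chad", 'Khartoum, Sudan']}, 'Arid (Desert)': {'characteristics': 'Very low rainfall, extreme temperatures', 'rainfall': 'Less than 200mm annually', 'temperature': '15-45°C', 'locations': ['Cairo, Egypt', 'Tripoli, Libya', 'Windhoek, Namibia']}, 'Mediterranean': {'characteristics': 'Mild, wet winters and dry summers', 'rainfall': '300-800mm annually', 'temperature': '10-30°C', 'locations': ['Casablanca, Morocco', 'Algiers, Algeria', 'Tunis, Tunisia', 'Cape Town, South Africa']}, 'Highland Tropical': {'characteristics': 'Cooler temperatures due to altitude, bimodal rainfall', 'rainfall': '800-2000mm annually', 'temperature': '10-25°C', 'locations': ['Addis Ababa, Ethiopia', 'Nairobi, Kenya', 'Kigali, Rwanda', 'Kampala, Uganda', 'Antananarivo, Madagascar']}}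
--
-- # Precomputed reverse index: location -> result dict; first zone wins for duplicates.
-- LOCATION_CLIMATE = {}
-- for _climate, _info in CLIMATE_ZONES.items():
--     _result = {
--         'climate_type': _climate,
--         'characteristics': _info['characteristics'],
--         'rainfall': _info['rainfall'],
--         'temperature': _info['temperature']
--     }
--     for _loc in _info['locations']:
--         LOCATION_CLIMATE.setdefault(_loc, _result)
--
-- def get_location_climate(location):
--     """Get climate information for a specific location"""
--     return LOCATION_CLIMATE.get(location)
-- ===== Notes on version B (the rewrite author's own statement) =====
-- stated objective: idiomatic
-- what changed: Replaces the per-call scan over every climate zone's location list with a module-level reverse index dict (built once with setdefault so the first zone wins for duplicates like 'Nairobi, Kenya'); the function becomes a single dict .get lookup.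
import Mathlib
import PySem

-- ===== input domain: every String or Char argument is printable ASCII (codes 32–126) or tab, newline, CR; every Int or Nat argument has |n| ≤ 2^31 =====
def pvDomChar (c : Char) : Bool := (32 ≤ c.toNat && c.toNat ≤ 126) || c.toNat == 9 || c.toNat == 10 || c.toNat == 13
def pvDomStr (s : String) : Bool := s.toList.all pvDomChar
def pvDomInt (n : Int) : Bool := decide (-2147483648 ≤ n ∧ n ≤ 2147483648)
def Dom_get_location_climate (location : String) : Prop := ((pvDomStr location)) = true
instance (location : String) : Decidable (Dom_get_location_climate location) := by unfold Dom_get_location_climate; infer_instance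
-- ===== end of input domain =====

set_option maxRecDepth 100000


-- B replaces A's per-call scan over all climate zones by a reverse index built once
-- at module level (first occurrence wins, preserving A's first-match behaviour); objective: idiomatic.

-- ===== PORT A =====
-- CLIMATE_ZONES transliterated as (climate, characteristics, rainfall, temperature, locations), insertion order.
def climateZones : List (String × String × String × String × List String) := [
  ("Tropical Rainforest", "High rainfall, high humidity, constant temperatures", "1500-3000mm annually", "20-30°C year-round", ["Kinshasa, Congo (DRC)", "Douala, Cameroon", "Libreville, Gabon", "Abidjan, Ivory Coast", "Monrovia, Liberia"]),
  ("Tropical Savanna", "Distinct wet and dry seasons", "600-1500mm annually", "18-35°C", ["Lagos, Nigeria", "Accra, Ghana", "Nairobi, Kenya", "Dar es Salaam, Tanzania", "Lusaka, Zambia"]),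
  ("Semi-Arid (Sahel)", "Low, erratic rainfall, high temperatures", "200-600mm annually", "20-40°C", ["Niamey, Niger", "Bamako, Mali", "Ouagadougou, Burkina Faso", "N'Djamena, Chad", "Khartoum, Sudan"]),
  ("Arid (Desert)", "Very low rainfall, extreme temperatures", "Less than 200mm annually", "15-45°C", ["Cairo, Egypt", "Tripoli, Libya", "Windhoek, Namibia"]),
  ("Mediterranean", "Mild, wet winters and dry summers", "300-800mm annually", "10-30°C", ["Casablanca, Morocco", "Algiers, Algeria", "Tunis, Tunisia", "Cape Town, South Africa"]),
  ("Highland Tropical", "Cooler temperatures due to altitude, bimodal rainfall", "800-2000mm annually", "10-25°C", ["Addis Ababa, Ethiopia", "Nairobi, Kenya", "Kigali, Rwanda", "Kampala, Uganda", "Antananarivo, Madagascar"])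
]

-- the for-loop with early return, zone by zone
def lookupZones (location : String) : List (String × String × String × String × List String) → Option (List (String × String))
  | [] => none
  | (climate, ch, rf, tp, locs) :: rest =>
    if locs.contains location then
      some [("climate_type", climate), ("characteristics", ch), ("rainfall", rf), ("temperature", tp)]
    else lookupZones location rest

def get_location_climate (location : String) : Option (List (String × String)) :=
  lookupZones location climateZones

-- ===== PORT B =====
-- module-level reverse index: setdefault so the first zone containing a location wins
def LOCATION_CLIMATE : PySem.Dict String (List (String × String)) :=
  climateZones.foldl (fun d z =>
    let result := [("climate_type", z.1), ("characteristics", z.2.1), ("rainfall", z.2.2.1), ("temperature", z.2.2.2.1)]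
    z.2.2.2.2.foldl (fun d loc => if (d.get? loc).isSome then d else d.insert loc result) d)
    PySem.Dict.empty

def get_location_climate_alt (location : String) : Option (List (String × String)) :=
  LOCATION_CLIMATE.get? location

-- ===== PRECONDITION & SPEC =====
def Spec_get_location_climate (location : String) (out : Option (List (String × String))) : Prop := out = get_location_climate_alt location
instance (location : String) (out : Option (List (String × String))) : Decidable (Spec_get_location_climate location out) := by unfold Spec_get_location_climate; infer_instance

-- ===== CLAIM (what is proved, stated in full; the proofs are below) =====
def Claim_equal_get_location_climate : Prop := ∀ (location : String), Dom_get_location_climate location → Spec_get_location_climate location (get_location_climate location)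

-- ===== LEMMAS AND PROOFS =====
-- the index, evaluated to its literal association list
theorem LC_eq : LOCATION_CLIMATE = PySem.Dict.mk [
  ("Kinshasa, Congo (DRC)", [("climate_type", "Tropical Rainforest"), ("characteristics", "High rainfall, high humidity, constant temperatures"), ("rainfall", "1500-3000mm annually"), ("temperature", "20-30°C year-round")]),
  ("Douala, Cameroon", [("climate_type", "Tropical Rainforest"), ("characteristics", "High rainfall, high humidity, constant temperatures"), ("rainfall", "1500-3000mm annually"), ("temperature", "20-30°C year-round")]),
  ("Libreville, Gabon", [("climate_type", "Tropical Rainforest"), ("characteristics", "High rainfall, high humidity, constant temperatures"), ("rainfall", "1500-3000mm annually"), ("temperature", "20-30°C year-round")]),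
  ("Abidjan, Ivory Coast", [("climate_type", "Tropical Rainforest"), ("characteristics", "High rainfall, high humidity, constant temperatures"), ("rainfall", "1500-3000mm annually"), ("temperature", "20-30°C year-round")]),
  ("Monrovia, Liberia", [("climate_type", "Tropical Rainforest"), ("characteristics", "High rainfall, high humidity, constant temperatures"), ("rainfall", "1500-3000mm annually"), ("temperature", "20-30°C year-round")]),
  ("Lagos, Nigeria", [("climate_type", "Tropical Savanna"), ("characteristics", "Distinct wet and dry seasons"), ("rainfall", "600-1500mm annually"), ("temperature", "18-35°C")]),
  ("Accra, Ghana", [("climate_type", "Tropical Savanna"), ("characteristics", "Distinct wet and dry seasons"), ("rainfall", "600-1500mm annually"), ("temperature", "18-35°C")]),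
  ("Nairobi, Kenya", [("climate_type", "Tropical Savanna"), ("characteristics", "Distinct wet and dry seasons"), ("rainfall", "600-1500mm annually"), ("temperature", "18-35°C")]),
  ("Dar es Salaam, Tanzania", [("climate_type", "Tropical Savanna"), ("characteristics", "Distinct wet and dry seasons"), ("rainfall", "600-1500mm annually"), ("temperature", "18-35°C")]),
  ("Lusaka, Zambia", [("climate_type", "Tropical Savanna"), ("characteristics", "Distinct wet and dry seasons"), ("rainfall", "600-1500mm annually"), ("temperature", "18-35°C")]),
  ("Niamey, Niger", [("climate_type", "Semi-Arid (Sahel)"), ("characteristics", "Low, erratic rainfall, high temperatures"), ("rainfall", "200-600mm annually"), ("temperature", "20-40°C")]),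
  ("Bamako, Mali", [("climate_type", "Semi-Arid (Sahel)"), ("characteristics", "Low, erratic rainfall, high temperatures"), ("rainfall", "200-600mm annually"), ("temperature", "20-40°C")]),
  ("Ouagadougou, Burkina Faso", [("climate_type", "Semi-Arid (Sahel)"), ("characteristics", "Low, erratic rainfall, high temperatures"), ("rainfall", "200-600mm annually"), ("temperature", "20-40°C")]),
  ("N'Djamena, Chad", [("climate_type", "Semi-Arid (Sahel)"), ("characteristics", "Low, erratic rainfall, high temperatures"), ("rainfall", "200-600mm annually"), ("temperature", "20-40°C")]),
  ("Khartoum, Sudan", [("climate_type", "Semi-Arid (Sahel)"), ("characteristics", "Low, erratic rainfall, high temperatures"), ("rainfall", "200-600mm annually"), ("temperature", "20-40°C")]),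
  ("Cairo, Egypt", [("climate_type", "Arid (Desert)"), ("characteristics", "Very low rainfall, extreme temperatures"), ("rainfall", "Less than 200mm annually"), ("temperature", "15-45°C")]),
  ("Tripoli, Libya", [("climate_type", "Arid (Desert)"), ("characteristics", "Very low rainfall, extreme temperatures"), ("rainfall", "Less than 200mm annually"), ("temperature", "15-45°C")]),
  ("Windhoek, Namibia", [("climate_type", "Arid (Desert)"), ("characteristics", "Very low rainfall, extreme temperatures"), ("rainfall", "Less than 200mm annually"), ("temperature", "15-45°C")]),
  ("Casablanca, Morocco", [("climate_type", "Mediterranean"), ("characteristics", "Mild, wet winters and dry summers"), ("rainfall", "300-800mm annually"), ("temperature", "10-30°C")]),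
  ("Algiers, Algeria", [("climate_type", "Mediterranean"), ("characteristics", "Mild, wet winters and dry summers"), ("rainfall", "300-800mm annually"), ("temperature", "10-30°C")]),
  ("Tunis, Tunisia", [("climate_type", "Mediterranean"), ("characteristics", "Mild, wet winters and dry summers"), ("rainfall", "300-800mm annually"), ("temperature", "10-30°C")]),
  ("Cape Town, South Africa", [("climate_type", "Mediterranean"), ("characteristics", "Mild, wet winters and dry summers"), ("rainfall", "300-800mm annually"), ("temperature", "10-30°C")]),
  ("Addis Ababa, Ethiopia", [("climate_type", "Highland Tropical"), ("characteristics", "Cooler temperatures due to altitude, bimodal rainfall"), ("rainfall", "800-2000mm annually"), ("temperature", "10-25°C")]),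
  ("Kigali, Rwanda", [("climate_type", "Highland Tropical"), ("characteristics", "Cooler temperatures due to altitude, bimodal rainfall"), ("rainfall", "800-2000mm annually"), ("temperature", "10-25°C")]),
  ("Kampala, Uganda", [("climate_type", "Highland Tropical"), ("characteristics", "Cooler temperatures due to altitude, bimodal rainfall"), ("rainfall", "800-2000mm annually"), ("temperature", "10-25°C")]),
  ("Antananarivo, Madagascar", [("climate_type", "Highland Tropical"), ("characteristics", "Cooler temperatures due to altitude, bimodal rainfall"), ("rainfall", "800-2000mm annually"), ("temperature", "10-25°C")])
] := by decide

-- ===== VERDICT (by name: the statement is the Claim_ definition above) =====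
theorem get_location_climate_spec : Claim_equal_get_location_climate := by
  intro location _
  unfold Spec_get_location_climate
  by_cases h0 : location = "Kinshasa, Congo (DRC)"
  · subst h0; decide
  by_cases h1 : location = "Douala, Cameroon"
  · subst h1; decide
  by_cases h2 : location = "Libreville, Gabon"
  · subst h2; decide
  by_cases h3 : location = "Abidjan, Ivory Coast"
  · subst h3; decide
  by_cases h4 : location = "Monrovia, Liberia"
  · subst h4; decide
  by_cases h5 : location = "Lagos, Nigeria"
  · subst h5; decide
  by_cases h6 : location = "Accra, Ghana"
  · subst h6; decide
  by_cases h7 : location = "Nairobi, Kenya"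
  · subst h7; decide
  by_cases h8 : location = "Dar es Salaam, Tanzania"
  · subst h8; decide
  by_cases h9 : location = "Lusaka, Zambia"
  · subst h9; decide
  by_cases h10 : location = "Niamey, Niger"
  · subst h10; decide
  by_cases h11 : location = "Bamako, Mali"
  · subst h11; decide
  by_cases h12 : location = "Ouagadougou, Burkina Faso"
  · subst h12; decide
  by_cases h13 : location = "N'Djamena, Chad"
  · subst h13; decide
  by_cases h14 : location = "Khartoum, Sudan"
  · subst h14; decide
  by_cases h15 : location = "Cairo, Egypt"
  · subst h15; decide
  by_cases h16 : location = "Tripoli, Libya"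
  · subst h16; decide
  by_cases h17 : location = "Windhoek, Namibia"
  · subst h17; decide
  by_cases h18 : location = "Casablanca, Morocco"
  · subst h18; decide
  by_cases h19 : location = "Algiers, Algeria"
  · subst h19; decide
  by_cases h20 : location = "Tunis, Tunisia"
  · subst h20; decide
  by_cases h21 : location = "Cape Town, South Africa"
  · subst h21; decide
  by_cases h22 : location = "Addis Ababa, Ethiopia"
  · subst h22; decide
  by_cases h23 : location = "Kigali, Rwanda"
  · subst h23; decide
  by_cases h24 : location = "Kampala, Uganda"
  · subst h24; decide
  by_cases h25 : location = "Antananarivo, Madagascar"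
  · subst h25; decide
  simp [get_location_climate, get_location_climate_alt, lookupZones, climateZones, LC_eq,
        PySem.Dict.get?, beq_iff_eq, h0, Ne.symm h0, h1, Ne.symm h1, h2, Ne.symm h2, h3, Ne.symm h3, h4, Ne.symm h4, h5, Ne.symm h5, h6, Ne.symm h6, h7, Ne.symm h7, h8, Ne.symm h8, h9, Ne.symm h9, h10, Ne.symm h10, h11, Ne.symm h11, h12, Ne.symm h12, h13, Ne.symm h13, h14, Ne.symm h14, h15, Ne.symm h15, h16, Ne.symm h16, h17, Ne.symm h17, h18, Ne.symm h18, h19, Ne.symm h19, h20, Ne.symm h20, h21, Ne.symm h21, h22, Ne.symm h22, h23, Ne.symm h23, h24, Ne.symm h24, h25, Ne.symm h25]
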